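-- pv_equiv track=rewrite | github.com/thierry-tct/muteria | muteria/statistics/algorithms.py | getCommonSetsSizes_venn
-- ===== SOURCE A (Python) =====
-- import itertools
--
-- def getCommonSetsSizes_venn (setsElemsDict, setsize_from=None,
--                                 setsize_to=None, name_delim='&',
--                                 not_common=None):
--     '''
--         TODO:
--     '''
--     if not_common is not None:
--         assert type(not_common) == dict and len(not_common) == 0
--
--     res_set = {}
--     if setsize_from is None:
--         setsize_from = 1
--     if setsize_to is None:
--         setsize_to = len(setsElemsDict)
--     ordered_keys = list(setsElemsDict)
--     for setsize in range(setsize_from, setsize_to+1):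
--         for set_pos in itertools.combinations(range(len(ordered_keys)), setsize):
--             name_key = name_delim.join([ordered_keys[i] for i in set_pos])
--             assert name_key not in res_set
--             res_set[name_key] = None
--             #print (set_pos, len(set_pos))
--             for i in set_pos:
--                 if res_set[name_key] is None:
--                     res_set[name_key] = set(setsElemsDict[ordered_keys[i]])
--                 else:
--                     res_set[name_key] &= setsElemsDict[ordered_keys[i]]
--
--             if not_common is not None:
--                 assert name_key not in not_common
--                 not_common[name_key] = {}
--                 for i in set_pos:
--                     name_i = ordered_keys[i]
--                     extra_tmp = list(set(setsElemsDict[name_i]) - res_set[name_key])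
--                     if len(extra_tmp) > 0:
--                         not_common[name_key][name_i] = extra_tmp
--
--     #print (res_set)
--     res_num = {}
--     for v in res_set:
--         res_num[v] = len(res_set[v])
--
--     return res_num, res_set
-- ===== SOURCE B (Python) =====
-- def getCommonSetsSizes_venn(setsElemsDict, setsize_from=None,
--                             setsize_to=None, name_delim='&',
--                             not_common=None):
--     # DFS over the combination trie: each combination's intersection is built
--     # from its parent's intersection with ONE extra set, instead of re-intersecting
--     # the whole combination from scratch.  Mutates not_common (when given) like A.
--     if not_common is not None:
--         assert type(not_common) == dict and len(not_common) == 0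
--     keys = list(setsElemsDict)
--     n = len(keys)
--     f = 1 if setsize_from is None else setsize_from
--     t = n if setsize_to is None else setsize_to
--     cap = min(t, n)
--     nodes = []  # (combo, intersection) in DFS preorder
--
--     def dfs(combo, inter):
--         nodes.append((combo, inter))
--         if len(combo) < cap:
--             for j in range(combo[-1] + 1, n):
--                 dfs(combo + (j,), inter & setsElemsDict[keys[j]])
--
--     if cap >= 1:
--         for j in range(n):
--             dfs((j,), set(setsElemsDict[keys[j]]))
--
--     by_size = {}
--     for combo, inter in nodes:
--         by_size.setdefault(len(combo), []).append((combo, inter))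
--
--     res_num = {}
--     res_set = {}
--     for k in range(max(f, 1), cap + 1):
--         for combo, inter in by_size.get(k, []):
--             name = name_delim.join(keys[i] for i in combo)
--             res_num[name] = len(inter)
--             res_set[name] = inter
--             if not_common is not None:
--                 nc = {}
--                 for i in combo:
--                     extra = list(set(setsElemsDict[keys[i]]) - inter)
--                     if len(extra) > 0:
--                         nc[keys[i]] = extra
--                 not_common[name] = nc
--     return res_num, res_set
-- ===== Notes on version B (the rewrite author's own statement) =====
-- stated objective: faster
-- what changed: Instead of re-intersecting every combination from scratch (a loop over all its members per combination, inside nested size/combination loops), B does one DFS over the combination trie that derives each combination's intersection from its parent's with a single set-intersection, buckets the nodes by size, and then emits the requested size range from the buckets.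
import Mathlib
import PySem

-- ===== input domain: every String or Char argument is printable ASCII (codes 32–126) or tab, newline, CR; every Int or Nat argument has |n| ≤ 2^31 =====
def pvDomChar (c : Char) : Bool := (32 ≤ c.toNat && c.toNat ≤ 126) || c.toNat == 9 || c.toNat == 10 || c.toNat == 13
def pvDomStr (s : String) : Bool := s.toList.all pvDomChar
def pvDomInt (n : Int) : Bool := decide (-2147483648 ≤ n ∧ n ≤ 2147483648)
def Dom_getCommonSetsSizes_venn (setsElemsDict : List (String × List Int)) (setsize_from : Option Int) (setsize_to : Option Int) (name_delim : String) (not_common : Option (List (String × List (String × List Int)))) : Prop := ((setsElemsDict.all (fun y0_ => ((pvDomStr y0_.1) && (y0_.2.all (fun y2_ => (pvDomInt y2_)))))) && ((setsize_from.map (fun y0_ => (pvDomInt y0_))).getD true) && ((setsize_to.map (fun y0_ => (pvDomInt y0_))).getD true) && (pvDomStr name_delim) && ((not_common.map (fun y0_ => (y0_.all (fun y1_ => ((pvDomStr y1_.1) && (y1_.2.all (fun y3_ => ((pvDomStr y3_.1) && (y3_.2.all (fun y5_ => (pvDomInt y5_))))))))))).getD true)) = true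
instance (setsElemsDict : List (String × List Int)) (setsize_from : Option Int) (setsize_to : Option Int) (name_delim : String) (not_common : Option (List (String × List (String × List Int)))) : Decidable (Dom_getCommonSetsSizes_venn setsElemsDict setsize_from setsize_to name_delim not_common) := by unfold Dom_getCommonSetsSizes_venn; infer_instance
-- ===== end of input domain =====

-- B replaces A's per-combination from-scratch intersection loop by a DFS over the combination
-- trie that reuses the parent's intersection (objective: faster).  The equivalence proved here is
-- about the RETURN value; A also fills the not_common argument in place (Source B performs the same
-- mutation; the Lean ports model the return value only).

-- shared transliteration helpers: Python's setsElemsDict[key] and name_delim.join(...)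
def pvLookup (d : List (String × List Int)) (k : String) : List Int :=
  (PySem.Dict.ofList d).getD k []
def pvName (delim : String) (keys : List String) (combo : List Nat) : String :=
  PySem.Str.join delim (combo.map (fun i => keys.getD i ""))

-- ===== PORT A =====
-- the not_common bookkeeping only mutates the argument, never the return value, so it is not
-- modelled; A's raising inputs (non-empty not_common, duplicate joined names, sizes <= 0 in the
-- range) are excluded by Pre_, the port totalizes those spots with getD.
-- A's nested loops: for setsize in range(f, t+1): for set_pos in combinations(range(n), setsize): ...
def pvResSetA (d : List (String × List Int)) (keys : List String) (f t : Int) (delim : String) :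
    PySem.Dict String (Option (List Int)) :=
  (PySem.List.pyRange f (t + 1) 1).foldl (fun rs setsize =>
    (PySem.List.combinations (List.range keys.length) setsize.toNat).foldl (fun rs set_pos =>
      let name_key := pvName delim keys set_pos
      set_pos.foldl (fun rs i =>
        match rs.getD name_key none with
        | none => rs.insert name_key (some (PySem.Set.ofList (pvLookup d (keys.getD i ""))))
        | some s => rs.insert name_key (some (PySem.Set.inter s (pvLookup d (keys.getD i "")))))
        (rs.insert name_key none)) rs) PySem.Dict.empty

def getCommonSetsSizes_venn (setsElemsDict : List (String × List Int)) (setsize_from : Option Int) (setsize_to : Option Int) (name_delim : String) (not_common : Option (List (String × List (String × List Int)))) : (List (String × Int)) × (List (String × List Int)) :=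
  let res_set := pvResSetA setsElemsDict (setsElemsDict.map Prod.fst) (setsize_from.getD 1)
    (setsize_to.getD (setsElemsDict.length : Int)) name_delim
  let res_num : PySem.Dict String Int :=
    res_set.keys.foldl (fun rn v => rn.insert v (((res_set.getD v none).getD []).length : Int)) PySem.Dict.empty
  (res_num.items, res_set.items.map (fun kv => (kv.1, kv.2.getD [])))

-- ===== PORT B =====
-- Source B's dfs(combo, inter): budget = cap - len(combo), so 'budget = 0' is 'not (len(combo) < cap)'
def pvDfsB (d : List (String × List Int)) (keys : List String) (n : Nat) :
    Nat → List Nat → List Int → List (List Nat × List Int)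
  | 0, combo, inter => [(combo, inter)]
  | budget + 1, combo, inter =>
    (combo, inter) ::
      (List.range' (combo.getLastD 0 + 1) (n - (combo.getLastD 0 + 1))).flatMap
        (fun j => pvDfsB d keys n budget (combo ++ [j])
          (PySem.Set.inter inter (pvLookup d (keys.getD j ""))))

-- Source B (the not_common mutation has no effect on the return value and is not modelled)
def getCommonSetsSizes_venn_alt (setsElemsDict : List (String × List Int)) (setsize_from : Option Int) (setsize_to : Option Int) (name_delim : String) (not_common : Option (List (String × List (String × List Int)))) : (List (String × Int)) × (List (String × List Int)) :=
  let keys := setsElemsDict.map Prod.fst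
  let n := keys.length
  let f : Int := setsize_from.getD 1
  let t : Int := setsize_to.getD (n : Int)
  let cap : Int := min t (n : Int)
  let nodes : List (List Nat × List Int) :=
    if 1 ≤ cap then
      (List.range n).flatMap (fun j =>
        pvDfsB setsElemsDict keys n (cap - 1).toNat [j]
          (PySem.Set.ofList (pvLookup setsElemsDict (keys.getD j ""))))
    else []
  let by_size : PySem.Dict Int (List (List Nat × List Int)) :=
    nodes.foldl (fun bs p => bs.modify ((p.1.length : Int)) [] (· ++ [p])) PySem.Dict.empty
  let emit :=
    (PySem.List.pyRange (max f 1) (cap + 1) 1).foldl (fun acc k =>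
      (by_size.getD k []).foldl (fun acc p =>
        let name := pvName name_delim keys p.1
        (acc.1.insert name ((p.2.length : Int)), acc.2.insert name p.2)) acc)
      ((PySem.Dict.empty : PySem.Dict String Int), (PySem.Dict.empty : PySem.Dict String (List Int)))
  (emit.1.items, emit.2.items)

-- ===== PRECONDITION & SPEC =====
-- every joined combination name A will produce (the size range clamped to [1, n], beyond which
-- there are no combinations anyway)
def pvAllNames (setsElemsDict : List (String × List Int)) (setsize_from : Option Int) (setsize_to : Option Int) (name_delim : String) : List String :=
  let keys := setsElemsDict.map Prod.fst
  let n := keys.length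
  let f : Int := max (setsize_from.getD 1) 1
  let t : Int := min (setsize_to.getD (n : Int)) (n : Int)
  (PySem.List.pyRange f (t + 1) 1).flatMap (fun k =>
    (PySem.List.combinations (List.range n) k.toNat).map (pvName name_delim keys))

-- Pre_ excludes exactly: association lists with duplicate keys (not representable as the Python
-- dict argument); a non-empty not_common dict (A's assert raises); a size range containing a
-- value ≤ 0 (ValueError for negative sizes, TypeError via len(None) for size 0); and colliding
-- joined combination names (A's assert raises).
def Pre_getCommonSetsSizes_venn (setsElemsDict : List (String × List Int)) (setsize_from : Option Int) (setsize_to : Option Int) (name_delim : String) (not_common : Option (List (String × List (String × List Int)))) : Prop :=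
  (setsElemsDict.map Prod.fst).Nodup ∧
  (not_common = none ∨ not_common = some []) ∧
  (1 ≤ setsize_from.getD 1 ∨ setsize_to.getD (setsElemsDict.length : Int) < setsize_from.getD 1) ∧
  (pvAllNames setsElemsDict setsize_from setsize_to name_delim).Nodup
instance (setsElemsDict : List (String × List Int)) (setsize_from : Option Int) (setsize_to : Option Int) (name_delim : String) (not_common : Option (List (String × List (String × List Int)))) : Decidable (Pre_getCommonSetsSizes_venn setsElemsDict setsize_from setsize_to name_delim not_common) := by unfold Pre_getCommonSetsSizes_venn; infer_instance

def pvWitness_getCommonSetsSizes_venn : (List (String × List Int)) × Option Int × Option Int × String × (Option (List (String × List (String × List Int)))) :=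
  ([("a", [1, 2]), ("b", [2, 3])], none, none, "&", none)

def Spec_getCommonSetsSizes_venn (setsElemsDict : List (String × List Int)) (setsize_from : Option Int) (setsize_to : Option Int) (name_delim : String) (not_common : Option (List (String × List (String × List Int)))) (out : (List (String × Int)) × (List (String × List Int))) : Prop := out = getCommonSetsSizes_venn_alt setsElemsDict setsize_from setsize_to name_delim not_common
instance (setsElemsDict : List (String × List Int)) (setsize_from : Option Int) (setsize_to : Option Int) (name_delim : String) (not_common : Option (List (String × List (String × List Int)))) (out : (List (String × Int)) × (List (String × List Int))) : Decidable (Spec_getCommonSetsSizes_venn setsElemsDict setsize_from setsize_to name_delim not_common out) := by unfold Spec_getCommonSetsSizes_venn; infer_instance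

-- ===== CLAIM (what is proved, stated in full; the proofs are below) =====
def Claim_equal_getCommonSetsSizes_venn : Prop := ∀ (setsElemsDict : List (String × List Int)) (setsize_from : Option Int) (setsize_to : Option Int) (name_delim : String) (not_common : Option (List (String × List (String × List Int)))), Dom_getCommonSetsSizes_venn setsElemsDict setsize_from setsize_to name_delim not_common → Pre_getCommonSetsSizes_venn setsElemsDict setsize_from setsize_to name_delim not_common → Spec_getCommonSetsSizes_venn setsElemsDict setsize_from setsize_to name_delim not_common (getCommonSetsSizes_venn setsElemsDict setsize_from setsize_to name_delim not_common)


-- ===== LEMMAS AND PROOFS =====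

-- ---- proof-side characterization: the intersection of a combination, and the canonical
-- ---- (name, intersection) list in output order ----

def pvG (d : List (String × List Int)) (keys : List String) (s : List Int) (j : Nat) : List Int :=
  PySem.Set.inter s (pvLookup d (keys.getD j ""))

def pvInterOf (d : List (String × List Int)) (keys : List String) : List Nat → List Int
  | [] => []
  | i :: rest => rest.foldl (pvG d keys) (PySem.Set.ofList (pvLookup d (keys.getD i "")))

def pvCanon (d : List (String × List Int)) (keys : List String) (delim : String) (n : Nat)
    (sizes : List Int) : List (String × List Int) :=
  sizes.flatMap (fun k => (PySem.List.combinations (List.range n) k.toNat).map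
    (fun c => (pvName delim keys c, pvInterOf d keys c)))

-- the common value both ports are shown to equal
def pvOut (d : List (String × List Int)) (sf st : Option Int) (delim : String) :
    (List (String × Int)) × (List (String × List Int)) :=
  let canon := pvCanon d (d.map Prod.fst) delim d.length
    (PySem.List.pyRange (max (sf.getD 1) 1) (min (st.getD (d.length : Int)) (d.length : Int) + 1) 1)
  (canon.map (fun q => (q.1, (q.2.length : Int))), canon)

theorem pvCanon_names (d : List (String × List Int)) (keys : List String) (delim : String)
    (n : Nat) (sizes : List Int) :
    (pvCanon d keys delim n sizes).map Prod.fst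
      = sizes.flatMap (fun k => (PySem.List.combinations (List.range n) k.toNat).map (pvName delim keys)) := by
  simp [pvCanon, List.map_flatMap, List.map_map, Function.comp_def]

theorem pv_allNames_eq (d : List (String × List Int)) (sf st : Option Int) (delim : String) :
    pvAllNames d sf st delim
      = (pvCanon d (d.map Prod.fst) delim d.length
          (PySem.List.pyRange (max (sf.getD 1) 1)
            (min (st.getD (d.length : Int)) (d.length : Int) + 1) 1)).map Prod.fst := by
  rw [pvCanon_names]
  simp [pvAllNames]

theorem pv_pyRange_nil {a b : Int} (h : b ≤ a) : PySem.List.pyRange a b 1 = [] := by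
  apply List.eq_nil_iff_forall_not_mem.mpr
  intro x hx
  rw [PySem.List.mem_pyRange_one] at hx
  omega

-- ---- A side: the triple insert/lookup dance per combination is one insert of the intersection ----

theorem pv_stageA (d : List (String × List Int)) (keys : List String) (name : String)
    (rest : List Nat) :
    ∀ (rs : PySem.Dict String (Option (List Int))) (acc : List Int),
    rest.foldl (fun rs i =>
      match rs.getD name none with
      | none => rs.insert name (some (PySem.Set.ofList (pvLookup d (keys.getD i ""))))
      | some s => rs.insert name (some (PySem.Set.inter s (pvLookup d (keys.getD i "")))))
      (rs.insert name (some acc))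
    = rs.insert name (some (rest.foldl (pvG d keys) acc)) := by
  induction rest with
  | nil => intro rs acc; rfl
  | cons j rest ih =>
    intro rs acc
    simp only [List.foldl_cons, PySem.Dict.getD_insert_self, PySem.Dict.insert_insert_self, pvG]
    exact ih rs (PySem.Set.inter acc (pvLookup d (keys.getD j "")))

theorem pv_comboA (d : List (String × List Int)) (keys : List String) (name : String)
    (c : List Nat) (hc : c ≠ []) (rs : PySem.Dict String (Option (List Int))) :
    c.foldl (fun rs i =>
      match rs.getD name none with
      | none => rs.insert name (some (PySem.Set.ofList (pvLookup d (keys.getD i ""))))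
      | some s => rs.insert name (some (PySem.Set.inter s (pvLookup d (keys.getD i "")))))
      (rs.insert name none)
    = rs.insert name (some (pvInterOf d keys c)) := by
  obtain ⟨i, rest, rfl⟩ := List.exists_cons_of_ne_nil hc
  simp only [List.foldl_cons, PySem.Dict.getD_insert_self, PySem.Dict.insert_insert_self, pvInterOf]
  exact pv_stageA d keys name rest rs (PySem.Set.ofList (pvLookup d (keys.getD i "")))

theorem pv_foldA (d : List (String × List Int)) (keys : List String) (delim : String)
    (sizes : List Int) (hall : ∀ k ∈ sizes, 1 ≤ k) :
    ∀ (rs : PySem.Dict String (Option (List Int))),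
    sizes.foldl (fun rs setsize =>
      (PySem.List.combinations (List.range keys.length) setsize.toNat).foldl (fun rs set_pos =>
        let name_key := pvName delim keys set_pos
        set_pos.foldl (fun rs i =>
          match rs.getD name_key none with
          | none => rs.insert name_key (some (PySem.Set.ofList (pvLookup d (keys.getD i ""))))
          | some s => rs.insert name_key (some (PySem.Set.inter s (pvLookup d (keys.getD i "")))))
          (rs.insert name_key none)) rs) rs
    = (pvCanon d keys delim keys.length sizes).foldl (fun rs p => rs.insert p.1 (some p.2)) rs := by
  induction sizes with
  | nil => intro rs; rfl
  | cons k sizes ih =>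
    intro rs
    have hk : 1 ≤ k := hall k (by simp)
    simp only [List.foldl_cons]
    have hcongr : ∀ (acc : PySem.Dict String (Option (List Int))),
        ∀ c ∈ PySem.List.combinations (List.range keys.length) k.toNat,
        (let name_key := pvName delim keys c
         c.foldl (fun rs i =>
           match rs.getD name_key none with
           | none => rs.insert name_key (some (PySem.Set.ofList (pvLookup d (keys.getD i ""))))
           | some s => rs.insert name_key (some (PySem.Set.inter s (pvLookup d (keys.getD i "")))))
           (acc.insert name_key none))
        = acc.insert (pvName delim keys c) (some (pvInterOf d keys c)) := by
      intro acc c hcmem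
      have hlen := PySem.List.length_of_mem_combinations hcmem
      have hc : c ≠ [] := by
        intro hnil; rw [hnil] at hlen; simp at hlen; omega
      exact pv_comboA d keys (pvName delim keys c) c hc acc
    rw [PySem.List.foldl_congr_mem _ _ _ _ hcongr]
    rw [ih (fun k' hk' => hall k' (by simp [hk']))]
    have hmap : (PySem.List.combinations (List.range keys.length) k.toNat).foldl
        (fun acc c => acc.insert (pvName delim keys c) (some (pvInterOf d keys c))) rs
      = ((PySem.List.combinations (List.range keys.length) k.toNat).map
          (fun c => (pvName delim keys c, pvInterOf d keys c))).foldl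
          (fun rs p => rs.insert p.1 (some p.2)) rs := by
      rw [List.foldl_map]
    rw [hmap]
    simp only [pvCanon, List.flatMap_cons, List.foldl_append]

theorem pv_resSetA (d : List (String × List Int)) (keys : List String) (f t : Int) (delim : String)
    (hall : ∀ k ∈ PySem.List.pyRange f (t + 1) 1, 1 ≤ k) :
    pvResSetA d keys f t delim
      = (pvCanon d keys delim keys.length (PySem.List.pyRange f (t + 1) 1)).foldl
          (fun rs p => rs.insert p.1 (some p.2)) PySem.Dict.empty := by
  unfold pvResSetA
  exact pv_foldA d keys delim (PySem.List.pyRange f (t + 1) 1) hall PySem.Dict.empty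

-- ---- B side: the DFS node list, filtered by size, is the combination list ----

def pvExts (n : Nat) : Nat → Nat → List (List Nat)
  | 0, _ => [[]]
  | b + 1, s => [] :: (List.range' s (n - s)).flatMap (fun j => (pvExts n b (j + 1)).map (j :: ·))

theorem pv_dfs_eq (d : List (String × List Int)) (keys : List String) (n : Nat) :
    ∀ (b : Nat) (combo : List Nat) (inter : List Int), combo ≠ [] →
    pvDfsB d keys n b combo inter
      = (pvExts n b (combo.getLastD 0 + 1)).map (fun e => (combo ++ e, e.foldl (pvG d keys) inter)) := by
  intro b
  induction b with
  | zero => intro combo inter hc; simp [pvDfsB, pvExts]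
  | succ b ih =>
    intro combo inter hc
    have hfun : ∀ j, pvDfsB d keys n b (combo ++ [j]) (PySem.Set.inter inter (pvLookup d (keys.getD j "")))
        = (pvExts n b (j + 1)).map (fun e => (combo ++ (j :: e), (j :: e).foldl (pvG d keys) inter)) := by
      intro j
      rw [ih (combo ++ [j]) (PySem.Set.inter inter (pvLookup d (keys.getD j ""))) (by simp),
        List.getLastD_concat]
      apply List.map_congr_left
      intro e _
      simp only [List.foldl_cons, pvG, List.append_assoc, List.singleton_append]
    simp only [pvDfsB, pvExts, hfun]
    simp [List.map_flatMap, List.map_map, Function.comp_def]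

theorem pv_combos_range' (n m : Nat) :
    ∀ (len s : Nat), s + len = n →
    PySem.List.combinations (List.range' s len) (m + 1)
      = (List.range' s len).flatMap (fun j =>
          (PySem.List.combinations (List.range' (j + 1) (n - (j + 1))) m).map (j :: ·)) := by
  intro len
  induction len with
  | zero => intro s h; simp [PySem.List.combinations_nil_succ]
  | succ len ih =>
    intro s h
    rw [List.range'_succ, PySem.List.combinations_cons_succ, List.flatMap_cons]
    have h1 : n - (s + 1) = len := by omega
    rw [h1, ih (s + 1) (by omega)]

theorem pv_exts_filter (n : Nat) :
    ∀ (b s m : Nat), s ≤ n →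
    (pvExts n b s).filter (fun e => e.length == m)
      = if m ≤ b then PySem.List.combinations (List.range' s (n - s)) m else [] := by
  intro b
  induction b with
  | zero =>
    intro s m hs
    cases m with
    | zero => simp [pvExts, PySem.List.combinations_zero]
    | succ m' => simp [pvExts]
  | succ b ih =>
    intro s m hs
    cases m with
    | zero =>
      simp [pvExts, List.filter_flatMap, List.filter_map, Function.comp_def,
        PySem.List.combinations_zero]
    | succ m' =>
      simp only [pvExts, List.filter_cons, List.length_nil]
      rw [if_neg (by simp)]
      simp only [List.filter_flatMap, List.filter_map]
      have hbranch : ∀ j ∈ List.range' s (n - s),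
          (List.filter ((fun e => e.length == m' + 1) ∘ (j :: ·)) (pvExts n b (j + 1))).map (j :: ·)
            = ((if m' ≤ b then PySem.List.combinations (List.range' (j + 1) (n - (j + 1))) m' else []).map (j :: ·)) := by
        intro j hj
        have hjn : j < n := by
          have := List.mem_range'_1.mp hj
          omega
        have hp : (List.filter ((fun e => e.length == m' + 1) ∘ (j :: ·)) (pvExts n b (j + 1)))
            = (pvExts n b (j + 1)).filter (fun e => e.length == m') := by
          apply List.filter_congr
          intro e _
          simp [Function.comp]
        rw [hp, ih (j + 1) m' (by omega)]
      rw [List.flatMap_congr hbranch]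
      by_cases hmb : m' ≤ b
      · rw [if_pos (by omega)]
        rw [pv_combos_range' n m' (n - s) s (by omega)]
        simp [hmb]
      · rw [if_neg (by omega)]
        simp [hmb]

theorem pv_nodes_filter (d : List (String × List Int)) (keys : List String) (n : Nat)
    (cap : Int) (_hcap : cap ≤ (n : Int)) (k : Int) (h1 : 1 ≤ k) (h2 : k ≤ cap) :
    ((List.range n).flatMap (fun j =>
        pvDfsB d keys n (cap - 1).toNat [j] (PySem.Set.ofList (pvLookup d (keys.getD j ""))))).filter
      (fun p => ((p.1.length : Int)) == k)
    = (PySem.List.combinations (List.range n) k.toNat).map (fun c => (c, pvInterOf d keys c)) := by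
  obtain ⟨m', hm⟩ : ∃ m', k.toNat = m' + 1 := ⟨k.toNat - 1, by omega⟩
  have hfun : ∀ j, pvDfsB d keys n (cap - 1).toNat [j] (PySem.Set.ofList (pvLookup d (keys.getD j "")))
      = (pvExts n (cap - 1).toNat (j + 1)).map
          (fun e => (j :: e, e.foldl (pvG d keys) (PySem.Set.ofList (pvLookup d (keys.getD j ""))))) := by
    intro j
    rw [pv_dfs_eq d keys n (cap - 1).toNat [j] (PySem.Set.ofList (pvLookup d (keys.getD j ""))) (by simp)]
    simp
  simp only [hfun, List.filter_flatMap, List.filter_map]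
  have hbranch : ∀ j ∈ List.range n,
      (List.filter ((fun (p : List Nat × List Int) => ((p.1.length : Int)) == k)
          ∘ (fun e => (j :: e, e.foldl (pvG d keys) (PySem.Set.ofList (pvLookup d (keys.getD j ""))))))
        (pvExts n (cap - 1).toNat (j + 1))).map
          (fun e => (j :: e, e.foldl (pvG d keys) (PySem.Set.ofList (pvLookup d (keys.getD j "")))))
      = (PySem.List.combinations (List.range' (j + 1) (n - (j + 1))) m').map
          ((fun c => (c, pvInterOf d keys c)) ∘ (j :: ·)) := by
    intro j hj
    have hjn : j < n := List.mem_range.mp hj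
    have hp : (List.filter ((fun (p : List Nat × List Int) => ((p.1.length : Int)) == k)
          ∘ (fun e => (j :: e, e.foldl (pvG d keys) (PySem.Set.ofList (pvLookup d (keys.getD j ""))))))
        (pvExts n (cap - 1).toNat (j + 1)))
        = (pvExts n (cap - 1).toNat (j + 1)).filter (fun e => e.length == m') := by
      apply List.filter_congr
      intro e _
      rw [Bool.eq_iff_iff]
      simp only [Function.comp, beq_iff_eq, List.length_cons]
      omega
    rw [hp, pv_exts_filter n (cap - 1).toNat (j + 1) m' (by omega), if_pos (by omega)]
    apply List.map_congr_left
    intro e _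
    simp [Function.comp, pvInterOf]
  rw [List.flatMap_congr hbranch]
  conv_rhs => rw [List.range_eq_range', hm, pv_combos_range' n m' n 0 (by omega)]
  rw [List.map_flatMap, List.range_eq_range']
  apply List.flatMap_congr
  intro j _
  rw [List.map_map]

theorem pv_bucket (nodes : List (List Nat × List Int)) (k : Int) :
    (nodes.foldl (fun bs p => bs.modify ((p.1.length : Int)) [] (· ++ [p]))
      (PySem.Dict.empty : PySem.Dict Int (List (List Nat × List Int)))).getD k []
      = nodes.filter (fun p => ((p.1.length : Int)) == k) := by
  have h := PySem.Dict.getD_foldl_modify_append (nodes.map (fun q => ((q.1.length : Int), q)))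
    (PySem.Dict.empty : PySem.Dict Int (List (List Nat × List Int))) k
  rw [List.foldl_map, List.filter_map] at h
  simp only [List.map_map, Function.comp_def, PySem.Dict.getD_empty, List.nil_append] at h
  rw [h]
  simp

-- ---- the range clamp: sizes > n contribute nothing, an empty range stays empty ----

theorem pv_canon_nil_of_big (d : List (String × List Int)) (keys : List String) (delim : String)
    (n : Nat) (sizes : List Int) (h : ∀ k ∈ sizes, (n : Int) < k) :
    pvCanon d keys delim n sizes = [] := by
  apply List.flatMap_eq_nil_iff.mpr
  intro k hk
  have := h k hk
  rw [PySem.List.combinations_eq_nil_of_length_lt]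
  · simp
  · simp only [List.length_range]; omega

theorem pv_ranges (d : List (String × List Int)) (keys : List String) (delim : String)
    (n : Nat) (f t : Int) (h : 1 ≤ f ∨ t < f) :
    pvCanon d keys delim n (PySem.List.pyRange f (t + 1) 1)
      = pvCanon d keys delim n (PySem.List.pyRange (max f 1) (min t (n : Int) + 1) 1) := by
  rcases h with h | h
  · rw [max_eq_left h]
    by_cases ht : t ≤ (n : Int)
    · rw [min_eq_left ht]
    · rw [min_eq_right (by omega)]
      by_cases hf : f ≤ (n : Int) + 1
      · rw [PySem.List.pyRange_one_append f ((n : Int) + 1) (t + 1) hf (by omega)]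
        have hnil : pvCanon d keys delim n (PySem.List.pyRange ((n : Int) + 1) (t + 1) 1) = [] := by
          apply pv_canon_nil_of_big
          intro k hk
          have := PySem.List.mem_pyRange_one.mp hk
          omega
        unfold pvCanon at hnil ⊢
        rw [List.flatMap_append, hnil, List.append_nil]
      · have hL : pvCanon d keys delim n (PySem.List.pyRange f (t + 1) 1) = [] := by
          apply pv_canon_nil_of_big
          intro k hk
          have := PySem.List.mem_pyRange_one.mp hk
          omega
        have hR : PySem.List.pyRange f ((n : Int) + 1) 1 = [] := pv_pyRange_nil (by omega)
        rw [hL, hR]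
        rfl
  · rw [pv_pyRange_nil (by omega), pv_pyRange_nil (by omega)]

-- ---- assembling the outputs from the canonical list ----

theorem pv_assembleA (canon : List (String × List Int)) (hnames : (canon.map Prod.fst).Nodup) :
    (((canon.foldl (fun rs p => rs.insert p.1 (some p.2))
          (PySem.Dict.empty : PySem.Dict String (Option (List Int)))).keys.foldl
        (fun rn v => rn.insert v ((((canon.foldl (fun rs p => rs.insert p.1 (some p.2))
          (PySem.Dict.empty : PySem.Dict String (Option (List Int)))).getD v none).getD []).length : Int))
        (PySem.Dict.empty : PySem.Dict String Int)).items,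
      (canon.foldl (fun rs p => rs.insert p.1 (some p.2))
          (PySem.Dict.empty : PySem.Dict String (Option (List Int)))).items.map
        (fun kv => (kv.1, kv.2.getD [])))
    = (canon.map (fun q => (q.1, (q.2.length : Int))), canon) := by
  have hemp : (PySem.Dict.empty : PySem.Dict String (Option (List Int))).items = [] := rfl
  have hitems := PySem.Dict.items_foldl_insert_fresh canon Prod.fst (fun p => some p.2)
    (PySem.Dict.empty : PySem.Dict String (Option (List Int)))
    (fun a _ => PySem.Dict.contains_empty _) hnames
  rw [hemp, List.nil_append] at hitems
  have hkeys : (canon.foldl (fun rs p => rs.insert p.1 (some p.2))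
      (PySem.Dict.empty : PySem.Dict String (Option (List Int)))).keys = canon.map Prod.fst := by
    have hk : (canon.foldl (fun rs p => rs.insert p.1 (some p.2))
        (PySem.Dict.empty : PySem.Dict String (Option (List Int)))).keys
        = (canon.foldl (fun rs p => rs.insert p.1 (some p.2))
        (PySem.Dict.empty : PySem.Dict String (Option (List Int)))).items.map Prod.fst := by
      simp [PySem.Dict.keys]
    rw [hk, hitems, List.map_map]
    exact List.map_congr_left (fun a _ => rfl)
  have hnd2 : (canon.foldl (fun rs p => rs.insert p.1 (some p.2))
      (PySem.Dict.empty : PySem.Dict String (Option (List Int)))).keys.Nodup := by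
    rw [hkeys]; exact hnames
  refine Prod.ext ?_ ?_
  · simp only []
    rw [hkeys]
    have hnum := PySem.Dict.items_foldl_insert_fresh (canon.map Prod.fst) (fun v => v)
      (fun v => ((((canon.foldl (fun rs p => rs.insert p.1 (some p.2))
        (PySem.Dict.empty : PySem.Dict String (Option (List Int)))).getD v none).getD []).length : Int))
      (PySem.Dict.empty : PySem.Dict String Int) (fun a _ => PySem.Dict.contains_empty _)
      (by simpa using hnames)
    rw [hnum]
    have hemp2 : (PySem.Dict.empty : PySem.Dict String Int).items = [] := rfl
    rw [hemp2, List.nil_append, List.map_map]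
    apply List.map_congr_left
    intro p hp
    have hmem : (p.1, some p.2) ∈ (canon.foldl (fun rs p => rs.insert p.1 (some p.2))
        (PySem.Dict.empty : PySem.Dict String (Option (List Int)))).items := by
      rw [hitems]
      exact List.mem_map_of_mem hp
    have hgd := PySem.Dict.getD_of_mem_items _ hmem hnd2 none
    simp [Function.comp, hgd]
  · simp only []
    rw [hitems, List.map_map]
    have hid : ∀ p ∈ canon, ((fun (kv : String × Option (List Int)) => (kv.1, kv.2.getD []))
        ∘ (fun (p : String × List Int) => (p.1, some p.2))) p = id p := fun p _ => rfl
    rw [List.map_congr_left hid, List.map_id]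

theorem pv_assembleB (canon : List (String × List Int)) (hnames : (canon.map Prod.fst).Nodup) :
    ((canon.foldl (fun acc q => (acc.1.insert q.1 ((q.2.length : Int)), acc.2.insert q.1 q.2))
        ((PySem.Dict.empty : PySem.Dict String Int),
         (PySem.Dict.empty : PySem.Dict String (List Int)))).1.items,
      (canon.foldl (fun acc q => (acc.1.insert q.1 ((q.2.length : Int)), acc.2.insert q.1 q.2))
        ((PySem.Dict.empty : PySem.Dict String Int),
         (PySem.Dict.empty : PySem.Dict String (List Int)))).2.items)
    = (canon.map (fun q => (q.1, (q.2.length : Int))), canon) := by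
  rw [PySem.List.foldl_prod_mk
    (f := fun (a : PySem.Dict String Int) (q : String × List Int) => a.insert q.1 ((q.2.length : Int)))
    (g := fun (a : PySem.Dict String (List Int)) (q : String × List Int) => a.insert q.1 q.2)]
  have h1 := PySem.Dict.items_foldl_insert_fresh canon Prod.fst
    (fun (q : String × List Int) => ((q.2.length : Int)))
    (PySem.Dict.empty : PySem.Dict String Int) (fun a _ => PySem.Dict.contains_empty _) hnames
  have h2 := PySem.Dict.items_foldl_insert_fresh canon Prod.fst
    (fun (q : String × List Int) => q.2)
    (PySem.Dict.empty : PySem.Dict String (List Int)) (fun a _ => PySem.Dict.contains_empty _) hnames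
  have hemp1 : (PySem.Dict.empty : PySem.Dict String Int).items = [] := rfl
  have hemp2 : (PySem.Dict.empty : PySem.Dict String (List Int)).items = [] := rfl
  rw [hemp1, List.nil_append] at h1
  rw [hemp2, List.nil_append] at h2
  refine Prod.ext ?_ ?_
  · simpa using h1
  · simp only []
    rw [h2]
    have hid : ∀ p ∈ canon, (fun (q : String × List Int) => (q.1, q.2)) p = id p := fun p _ => rfl
    rw [List.map_congr_left hid, List.map_id]

-- ---- port characterizations ----

theorem pv_portA (d : List (String × List Int)) (sf st : Option Int) (delim : String)
    (nc : Option (List (String × List (String × List Int))))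
    (h3 : 1 ≤ sf.getD 1 ∨ st.getD (d.length : Int) < sf.getD 1)
    (h4 : (pvAllNames d sf st delim).Nodup) :
    getCommonSetsSizes_venn d sf st delim nc = pvOut d sf st delim := by
  have hall : ∀ k ∈ PySem.List.pyRange (sf.getD 1) (st.getD (d.length : Int) + 1) 1, 1 ≤ k := by
    intro k hk
    have := PySem.List.mem_pyRange_one.mp hk
    rcases h3 with h | h <;> omega
  rw [pv_allNames_eq] at h4
  simp only [getCommonSetsSizes_venn]
  rw [pv_resSetA d (d.map Prod.fst) (sf.getD 1) (st.getD (d.length : Int)) delim hall]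
  simp only [List.length_map]
  rw [pv_ranges d (d.map Prod.fst) delim d.length (sf.getD 1) (st.getD (d.length : Int)) h3]
  rw [pv_assembleA _ h4]
  rfl

theorem pv_portB (d : List (String × List Int)) (sf st : Option Int) (delim : String)
    (nc : Option (List (String × List (String × List Int))))
    (h4 : (pvAllNames d sf st delim).Nodup) :
    getCommonSetsSizes_venn_alt d sf st delim nc = pvOut d sf st delim := by
  rw [pv_allNames_eq] at h4
  simp only [getCommonSetsSizes_venn_alt, List.length_map]
  by_cases hcap : 1 ≤ min (st.getD ((d.length : Int))) ((d.length : Int))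
  · rw [if_pos hcap]
    have hcongr : ∀ (acc : PySem.Dict String Int × PySem.Dict String (List Int)),
        ∀ k ∈ PySem.List.pyRange (max (sf.getD 1) 1)
          (min (st.getD ((d.length : Int))) ((d.length : Int)) + 1) 1,
        ((((List.range d.length).flatMap (fun j =>
            pvDfsB d (d.map Prod.fst) d.length
              ((min (st.getD ((d.length : Int))) ((d.length : Int))) - 1).toNat [j]
              (PySem.Set.ofList (pvLookup d ((d.map Prod.fst).getD j ""))))).foldl
            (fun bs p => bs.modify ((p.1.length : Int)) [] (· ++ [p])) PySem.Dict.empty).getD k []).foldl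
          (fun acc p =>
            let name := pvName delim (d.map Prod.fst) p.1
            (acc.1.insert name ((p.2.length : Int)), acc.2.insert name p.2)) acc
        = ((PySem.List.combinations (List.range d.length) k.toNat).map
            (fun c => (pvName delim (d.map Prod.fst) c, pvInterOf d (d.map Prod.fst) c))).foldl
            (fun acc q => (acc.1.insert q.1 ((q.2.length : Int)), acc.2.insert q.1 q.2)) acc := by
      intro acc k hk
      have hb := PySem.List.mem_pyRange_one.mp hk
      rw [pv_bucket]
      rw [pv_nodes_filter d (d.map Prod.fst) d.length
        (min (st.getD ((d.length : Int))) ((d.length : Int))) (min_le_right _ _) k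
        (by omega) (by omega)]
      rw [List.foldl_map, List.foldl_map]
    rw [PySem.List.foldl_congr_mem _ _ _ _ hcongr]
    rw [← List.foldl_flatMap]
    have hflat : ((PySem.List.pyRange (max (sf.getD 1) 1)
          (min (st.getD ((d.length : Int))) ((d.length : Int)) + 1) 1).flatMap
          (fun k => (PySem.List.combinations (List.range d.length) k.toNat).map
            (fun c => (pvName delim (d.map Prod.fst) c, pvInterOf d (d.map Prod.fst) c))))
        = pvCanon d (d.map Prod.fst) delim d.length
            (PySem.List.pyRange (max (sf.getD 1) 1)
              (min (st.getD ((d.length : Int))) ((d.length : Int)) + 1) 1) := rfl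
    rw [hflat]
    rw [pv_assembleB _ h4]
    rfl
  · rw [if_neg hcap]
    have hrange : PySem.List.pyRange (max (sf.getD 1) 1)
        (min (st.getD ((d.length : Int))) ((d.length : Int)) + 1) 1 = [] :=
      pv_pyRange_nil (by omega)
    rw [hrange]
    simp only [List.foldl_nil]
    have hout : pvOut d sf st delim = ([], []) := by
      simp only [pvOut, hrange, pvCanon, List.flatMap_nil, List.map_nil]
    rw [hout]
    rfl

-- ===== VERDICT (by name: the statement is the Claim_ definition above) =====
theorem getCommonSetsSizes_venn_spec : Claim_equal_getCommonSetsSizes_venn := by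
  intro d sf st delim nc _hDom hPre
  obtain ⟨_h1, _h2, h3, h4⟩ := hPre
  unfold Spec_getCommonSetsSizes_venn
  rw [pv_portA d sf st delim nc h3 h4, pv_portB d sf st delim nc h4]
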